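-- pv_equiv track=rewrite | github.com/avshiliaev/polya-enumeration-solver | src/polya_solver.py | _build_gcd_matrix
-- ===== SOURCE A (Python) =====
-- def _build_gcd_matrix(_positive_int):
--     """
--     Builds the gcd matrix for all pairs (x,y) with x,y <= max(_w, _h).
--
--     Args:
--         _positive_int (int): a positive integer.
--
--     Returns:
--         List[List[int]]: A matrix of GCDs.
--     """
--
--     gcd_matrix = [[0 for x in range(_positive_int)] for y in range(_positive_int)]
--     for i in range(_positive_int):
--         for j in range(i, _positive_int):
--             if i == 0 or j == 0:
--                 gcd_matrix[i][j] = 1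
--                 gcd_matrix[j][i] = 1
--             elif i == j:
--                 gcd_matrix[i][j] = i + 1
--             else:
--                 gcd_matrix[i][j] = gcd_matrix[i][j - i - 1]
--                 gcd_matrix[j][i] = gcd_matrix[i][j - i - 1]
--     return gcd_matrix
-- ===== SOURCE B (Python) =====
-- def _gcd(a, b):
--     while b:
--         a, b = b, a % b
--     return a
--
--
-- def _build_gcd_matrix(_positive_int):
--     return [[_gcd(i + 1, j + 1) for j in range(_positive_int)]
--             for i in range(_positive_int)]
-- ===== Notes on version B (the rewrite author's own statement) =====
-- stated objective: simpler
-- what changed: A fills the matrix with a subtractive-Euclid DP whose cells depend on previously computed cells; B computes each entry independently as the gcd of its one-based row and column indices with a plain Euclidean helper, with no table dependencies.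
import Mathlib
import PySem

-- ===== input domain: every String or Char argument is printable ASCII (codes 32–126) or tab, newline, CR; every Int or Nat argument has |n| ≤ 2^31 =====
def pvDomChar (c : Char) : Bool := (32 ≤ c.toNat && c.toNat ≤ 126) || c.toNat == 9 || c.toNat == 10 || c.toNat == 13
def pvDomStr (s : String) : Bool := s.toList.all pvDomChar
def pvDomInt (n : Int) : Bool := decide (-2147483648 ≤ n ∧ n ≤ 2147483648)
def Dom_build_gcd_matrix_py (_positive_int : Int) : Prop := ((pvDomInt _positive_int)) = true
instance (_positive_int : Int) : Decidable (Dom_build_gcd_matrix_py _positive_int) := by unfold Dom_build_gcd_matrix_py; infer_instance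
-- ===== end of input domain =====

-- B replaces A's subtractive-Euclid DP over the table by an independent per-cell
-- Euclidean gcd of the one-based indices; objective: simpler (no cross-cell dependency), not faster.

-- ===== PORT A =====
-- gcd_matrix[i][j]  (all reads/writes in A use in-range nonnegative indices; pyGetD/pySetD are exact there)
def pvMGet (m : List (List Int)) (i j : Int) : Int :=
  PySem.List.pyGetD (PySem.List.pyGetD m i ([] : List Int)) j 0

-- gcd_matrix[i][j] = v
def pvMSet (m : List (List Int)) (i j : Int) (v : Int) : List (List Int) :=
  PySem.List.pySetD m i (PySem.List.pySetD (PySem.List.pyGetD m i ([] : List Int)) j v)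

-- body of A's inner loop, step for step
def pvBodyA (i : Int) (m : List (List Int)) (j : Int) : List (List Int) :=
  if i = 0 ∨ j = 0 then
    pvMSet (pvMSet m i j 1) j i 1
  else if i = j then
    pvMSet m i j (i + 1)
  else
    let m1 := pvMSet m i j (pvMGet m i (j - i - 1))
    pvMSet m1 j i (pvMGet m1 i (j - i - 1))

def build_gcd_matrix_py (_positive_int : Int) : List (List Int) :=
  (PySem.List.pyRange 0 _positive_int 1).foldl
    (fun m i => (PySem.List.pyRange i _positive_int 1).foldl (pvBodyA i) m)
    ((PySem.List.pyRange 0 _positive_int 1).map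
      (fun _ => (PySem.List.pyRange 0 _positive_int 1).map (fun _ => (0 : Int))))

-- ===== PORT B =====
-- termination fact for the while-loop port (Python % has the divisor's sign, so |a % b| < |b|)
lemma pvModAbsLt (a b : Int) (hb : ¬ b = 0) : (PySem.Int.mod a b).natAbs < b.natAbs := by
  rcases lt_or_gt_of_ne hb with h | h
  · have := PySem.Int.mod_neg_bounds a h
    omega
  · have h1 := PySem.Int.mod_nonneg a h
    have h2 := PySem.Int.mod_lt a h
    omega

-- while b: a, b = b, a % b ; return a
def pvGcd (a b : Int) : Int :=
  if hb : b = 0 then a else pvGcd b (PySem.Int.mod a b)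
termination_by b.natAbs
decreasing_by exact pvModAbsLt a b hb

def build_gcd_matrix_py_alt (_positive_int : Int) : List (List Int) :=
  (PySem.List.pyRange 0 _positive_int 1).map
    (fun i => (PySem.List.pyRange 0 _positive_int 1).map (fun j => pvGcd (i + 1) (j + 1)))

-- ===== PRECONDITION & SPEC =====
def Spec_build_gcd_matrix_py (_positive_int : Int) (out : List (List Int)) : Prop := out = build_gcd_matrix_py_alt _positive_int
instance (_positive_int : Int) (out : List (List Int)) : Decidable (Spec_build_gcd_matrix_py _positive_int out) := by unfold Spec_build_gcd_matrix_py; infer_instance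

-- ===== CLAIM (what is proved, stated in full; the proofs are below) =====
def Claim_equal_build_gcd_matrix_py : Prop := ∀ (_positive_int : Int), Dom_build_gcd_matrix_py _positive_int → Spec_build_gcd_matrix_py _positive_int (build_gcd_matrix_py _positive_int)

-- ===== LEMMAS AND PROOFS =====

-- canonical n×n matrix given by an entry function
def pvMat (N : Nat) (f : Int → Int → Int) : List (List Int) :=
  (List.range N).map (fun (a : Nat) => (List.range N).map (fun (b : Nat) => f (a : Int) (b : Int)))

-- the intended entry value
def pvG (i j : Int) : Int := (Nat.gcd (i + 1).toNat (j + 1).toNat : Int)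

lemma pvMat_congr (N : Nat) (f f' : Int → Int → Int)
    (h : ∀ a b : Int, 0 ≤ a → a < N → 0 ≤ b → b < N → f a b = f' a b) :
    pvMat N f = pvMat N f' := by
  unfold pvMat
  apply List.map_congr_left
  intro a ha
  apply List.map_congr_left
  intro b hb
  rw [List.mem_range] at ha hb
  exact h _ _ (Int.natCast_nonneg a) (by exact_mod_cast ha) (Int.natCast_nonneg b)
    (by exact_mod_cast hb)

lemma pvRow_pvMat (N : Nat) (f : Int → Int → Int) (k : Nat) (hk : k < N) :
    PySem.List.pyGetD (pvMat N f) (k : Int) ([] : List Int) =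
      (List.range N).map (fun (b : Nat) => f (k : Int) (b : Int)) := by
  unfold pvMat
  rw [PySem.List.pyGetD_natCast]
  rw [List.getD_eq_getElem _ _ (by simpa using hk), List.getElem_map, List.getElem_range]

lemma pvMGet_pvMat (N : Nat) (f : Int → Int → Int) (i j : Int)
    (hi0 : 0 ≤ i) (hiN : i < N) (hj0 : 0 ≤ j) (hjN : j < N) :
    pvMGet (pvMat N f) i j = f i j := by
  obtain ⟨k, rfl⟩ : ∃ k : Nat, i = (k : Int) := ⟨i.toNat, by omega⟩
  obtain ⟨l, rfl⟩ : ∃ l : Nat, j = (l : Int) := ⟨j.toNat, by omega⟩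
  have hk : k < N := by exact_mod_cast hiN
  have hl : l < N := by exact_mod_cast hjN
  unfold pvMGet
  rw [pvRow_pvMat N f k hk, PySem.List.pyGetD_natCast]
  rw [List.getD_eq_getElem _ _ (by simpa using hl), List.getElem_map, List.getElem_range]

lemma pvMSet_pvMat (N : Nat) (f : Int → Int → Int) (i j v : Int)
    (hi0 : 0 ≤ i) (hiN : i < N) (hj0 : 0 ≤ j) (hjN : j < N) :
    pvMSet (pvMat N f) i j v = pvMat N (fun a b => if a = i ∧ b = j then v else f a b) := by
  obtain ⟨k, rfl⟩ : ∃ k : Nat, i = (k : Int) := ⟨i.toNat, by omega⟩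
  obtain ⟨l, rfl⟩ : ∃ l : Nat, j = (l : Int) := ⟨j.toNat, by omega⟩
  have hk : k < N := by exact_mod_cast hiN
  have hl : l < N := by exact_mod_cast hjN
  unfold pvMSet
  rw [pvRow_pvMat N f k hk, PySem.List.pySetD_natCast, PySem.List.pySetD_natCast]
  unfold pvMat
  apply List.ext_getElem
  · simp
  · intro p hp hp'
    rw [List.getElem_set]
    by_cases hkp : k = p
    · subst hkp
      rw [if_pos rfl, List.getElem_map, List.getElem_range]
      apply List.ext_getElem
      · simp
      · intro q hq hq'
        rw [List.getElem_set]
        by_cases hlq : l = q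
        · subst hlq
          rw [if_pos rfl, List.getElem_map, List.getElem_range]
          simp
        · rw [if_neg hlq, List.getElem_map, List.getElem_range, List.getElem_map,
            List.getElem_range]
          simp only []
          rw [if_neg (by omega)]
    · rw [if_neg hkp, List.getElem_map, List.getElem_range, List.getElem_map, List.getElem_range]
      apply List.map_congr_left
      intro b _
      simp only []
      rw [if_neg (by omega)]

lemma pvGcd_eq_natGcd : ∀ (c : Nat) (a b : Int), b.natAbs ≤ c → 0 ≤ a → 0 ≤ b →
    pvGcd a b = (Nat.gcd a.toNat b.toNat : Int) := by
  intro c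
  induction c with
  | zero =>
    intro a b hc ha hb
    have hb0 : b = 0 := by omega
    subst hb0
    rw [pvGcd]
    simp [Int.toNat_of_nonneg ha]
  | succ c ih =>
    intro a b hc ha hb
    by_cases hb0 : b = 0
    · subst hb0
      rw [pvGcd]
      simp [Int.toNat_of_nonneg ha]
    · have hbpos : 0 < b := lt_of_le_of_ne hb (Ne.symm hb0)
      rw [pvGcd, dif_neg hb0]
      have hmod : PySem.Int.mod a b = a % b := PySem.Int.mod_eq_emod_of_pos hbpos
      have h1 : 0 ≤ a % b := Int.emod_nonneg a hb0
      have h2 : a % b < b := Int.emod_lt_of_pos a hbpos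
      rw [hmod, ih b (a % b) (by omega) hb h1]
      have e1 : ((a.toNat % b.toNat : Nat) : Int) = a % b := by
        push_cast
        rw [Int.toNat_of_nonneg ha, Int.toNat_of_nonneg hb]
      have heq : (a % b).toNat = a.toNat % b.toNat := by omega
      rw [heq, Nat.gcd_comm b.toNat, ← Nat.gcd_rec, Nat.gcd_comm]

lemma pvG_symm (i j : Int) : pvG j i = pvG i j := by
  unfold pvG
  rw [Nat.gcd_comm]

lemma pvG_zero_left (j : Int) : pvG 0 j = 1 := by
  unfold pvG
  norm_num

lemma pvG_self (i : Int) (h : 0 ≤ i) : pvG i i = i + 1 := by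
  unfold pvG
  rw [Nat.gcd_self, Int.toNat_of_nonneg (by omega)]

lemma pvG_sub (i j : Int) (h0 : 0 ≤ i) (hij : i < j) : pvG i (j - i - 1) = pvG i j := by
  unfold pvG
  have h1 : (j + 1).toNat = (j - i - 1 + 1).toNat + (i + 1).toNat := by omega
  rw [h1, Nat.gcd_add_self_right]

-- the inner loop: processes j = j0 .. n-1 of row i, writing cells (i,j) and (j,i)
lemma pvInnerLoop (N : Nat) (i : Int) (hi0 : 0 ≤ i) (hiN : i < N) :
    ∀ (fuel : Nat) (j0 : Int) (f : Int → Int → Int), ((N : Int) - j0).toNat ≤ fuel → i ≤ j0 →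
    (∀ a b : Int, 0 ≤ a → a < N → 0 ≤ b → b < N →
      (min a b < i ∨ (min a b = i ∧ max a b < j0)) → f a b = pvG a b) →
    ∃ f', (PySem.List.pyRange j0 N 1).foldl (pvBodyA i) (pvMat N f) = pvMat N f' ∧
      (∀ a b : Int, 0 ≤ a → a < N → 0 ≤ b → b < N → min a b ≤ i → f' a b = pvG a b) := by
  intro fuel
  induction fuel with
  | zero =>
    intro j0 f hfuel hj0 hf
    have hNj : (N : Int) ≤ j0 := by omega
    rw [PySem.List.pyRange_one_eq_nil hNj]
    exact ⟨f, rfl, fun a b ha0 haN hb0 hbN hmin =>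
      hf a b ha0 haN hb0 hbN (by omega)⟩
  | succ fuel ih =>
    intro j0 f hfuel hj0 hf
    by_cases hNj : (N : Int) ≤ j0
    · rw [PySem.List.pyRange_one_eq_nil hNj]
      exact ⟨f, rfl, fun a b ha0 haN hb0 hbN hmin =>
        hf a b ha0 haN hb0 hbN (by omega)⟩
    · have hjN : j0 < (N : Int) := by omega
      rw [PySem.List.pyRange_one_cons hjN, List.foldl_cons]
      have hstep : ∃ f1, pvBodyA i (pvMat N f) j0 = pvMat N f1 ∧
          (∀ a b : Int, 0 ≤ a → a < N → 0 ≤ b → b < N →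
            (min a b < i ∨ (min a b = i ∧ max a b < j0 + 1)) → f1 a b = pvG a b) := by
        unfold pvBodyA
        by_cases hz : i = 0 ∨ j0 = 0
        · rw [if_pos hz]
          have hi00 : i = 0 := by rcases hz with h | h <;> omega
          subst hi00
          rw [pvMSet_pvMat N f 0 j0 1 le_rfl hiN (by omega) hjN]
          rw [pvMSet_pvMat N _ j0 0 1 (by omega) hjN le_rfl hiN]
          refine ⟨_, rfl, ?_⟩
          intro a b ha0 haN hb0 hbN hreg
          by_cases h1 : a = j0 ∧ b = 0
          · rw [if_pos h1, h1.1, h1.2, pvG_symm, pvG_zero_left]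
          · rw [if_neg h1]
            by_cases h2 : a = 0 ∧ b = j0
            · rw [if_pos h2, h2.1, h2.2, pvG_zero_left]
            · rw [if_neg h2]
              exact hf a b ha0 haN hb0 hbN (by omega)
        · rw [if_neg hz]
          by_cases hij : i = j0
          · rw [if_pos hij]
            rw [pvMSet_pvMat N f i j0 (i + 1) hi0 hiN (by omega) hjN]
            refine ⟨_, rfl, ?_⟩
            intro a b ha0 haN hb0 hbN hreg
            by_cases h1 : a = i ∧ b = j0
            · rw [if_pos h1, h1.1, h1.2, ← hij, pvG_self i hi0]
            · rw [if_neg h1]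
              exact hf a b ha0 haN hb0 hbN (by omega)
          · rw [if_neg hij]
            have hilt : i < j0 := by omega
            have hd0 : (0 : Int) ≤ j0 - i - 1 := by omega
            have hdN : j0 - i - 1 < (N : Int) := by omega
            have hval : f i (j0 - i - 1) = pvG i j0 := by
              rw [hf i (j0 - i - 1) hi0 hiN hd0 hdN (by omega)]
              exact pvG_sub i j0 hi0 hilt
            simp only [pvMGet_pvMat N f i (j0 - i - 1) hi0 hiN hd0 hdN]
            rw [pvMSet_pvMat N f i j0 _ hi0 hiN (by omega) hjN]
            simp only [pvMGet_pvMat N _ i (j0 - i - 1) hi0 hiN hd0 hdN]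
            rw [if_neg (by omega)]
            rw [pvMSet_pvMat N _ j0 i _ (by omega) hjN hi0 hiN]
            refine ⟨_, rfl, ?_⟩
            intro a b ha0 haN hb0 hbN hreg
            by_cases h1 : a = j0 ∧ b = i
            · rw [if_pos h1, h1.1, h1.2, hval, pvG_symm]
            · rw [if_neg h1]
              by_cases h2 : a = i ∧ b = j0
              · rw [if_pos h2, h2.1, h2.2, hval]
              · rw [if_neg h2]
                exact hf a b ha0 haN hb0 hbN (by omega)
      obtain ⟨f1, hm, hf1⟩ := hstep
      rw [hm]
      exact ih (j0 + 1) f1 (by omega) (by omega) hf1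

-- the outer loop over i = i0 .. n-1
lemma pvOuterLoop (N : Nat) :
    ∀ (fuel : Nat) (i0 : Int) (f : Int → Int → Int), ((N : Int) - i0).toNat ≤ fuel → 0 ≤ i0 →
    (∀ a b : Int, 0 ≤ a → a < N → 0 ≤ b → b < N → min a b < i0 → f a b = pvG a b) →
    ∃ f', (PySem.List.pyRange i0 N 1).foldl
        (fun m i => (PySem.List.pyRange i N 1).foldl (pvBodyA i) m) (pvMat N f) = pvMat N f' ∧
      (∀ a b : Int, 0 ≤ a → a < N → 0 ≤ b → b < N → f' a b = pvG a b) := by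
  intro fuel
  induction fuel with
  | zero =>
    intro i0 f hfuel hi0 hf
    have hNi : (N : Int) ≤ i0 := by omega
    rw [PySem.List.pyRange_one_eq_nil hNi]
    exact ⟨f, rfl, fun a b ha0 haN hb0 hbN =>
      hf a b ha0 haN hb0 hbN (by omega)⟩
  | succ fuel ih =>
    intro i0 f hfuel hi0 hf
    by_cases hNi : (N : Int) ≤ i0
    · rw [PySem.List.pyRange_one_eq_nil hNi]
      exact ⟨f, rfl, fun a b ha0 haN hb0 hbN =>
        hf a b ha0 haN hb0 hbN (by omega)⟩
    · have hiN : i0 < (N : Int) := by omega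
      rw [PySem.List.pyRange_one_cons hiN, List.foldl_cons]
      obtain ⟨f1, hm, hf1⟩ := pvInnerLoop N i0 hi0 hiN (((N : Int) - i0).toNat) i0 f le_rfl
        le_rfl (fun a b ha0 haN hb0 hbN hreg => hf a b ha0 haN hb0 hbN (by omega))
      rw [hm]
      exact ih (i0 + 1) f1 (by omega) (by omega)
        (fun a b ha0 haN hb0 hbN hmin => hf1 a b ha0 haN hb0 hbN (by omega))

lemma pvInit_eq (N : Nat) :
    ((PySem.List.pyRange 0 (N : Int) 1).map
      (fun _ => (PySem.List.pyRange 0 (N : Int) 1).map (fun _ => (0 : Int)))) =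
    pvMat N (fun _ _ => (0 : Int)) := by
  unfold pvMat
  simp only [List.map_const', PySem.List.length_pyRange_one, List.length_range, Int.sub_zero,
    Int.toNat_natCast]

lemma pvAlt_eq (N : Nat) :
    build_gcd_matrix_py_alt (N : Int) = pvMat N (fun i j => pvGcd (i + 1) (j + 1)) := by
  unfold build_gcd_matrix_py_alt pvMat
  rw [PySem.List.pyRange_one]
  simp only [List.map_map, Function.comp_def, zero_add, Int.sub_zero, Int.toNat_natCast]

-- ===== VERDICT (by name: the statement is the Claim_ definition above) =====
theorem build_gcd_matrix_py_spec : Claim_equal_build_gcd_matrix_py := by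
  intro n _
  unfold Spec_build_gcd_matrix_py
  by_cases hn : n ≤ 0
  · unfold build_gcd_matrix_py build_gcd_matrix_py_alt
    rw [PySem.List.pyRange_one_eq_nil hn]
    simp
  · obtain ⟨N, rfl⟩ : ∃ N : Nat, n = (N : Int) := ⟨n.toNat, by omega⟩
    unfold build_gcd_matrix_py
    rw [pvInit_eq N, pvAlt_eq N]
    obtain ⟨f', hm, hf'⟩ := pvOuterLoop N N 0 (fun _ _ => (0 : Int)) (by omega) le_rfl
      (fun a b ha0 _ hb0 _ hmin => absurd hmin (by omega))
    rw [hm]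
    apply pvMat_congr
    intro a b ha0 haN hb0 hbN
    rw [hf' a b ha0 haN hb0 hbN]
    unfold pvG
    exact (pvGcd_eq_natGcd (b + 1).natAbs (a + 1) (b + 1) le_rfl (by omega) (by omega)).symm
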